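-- pv_equiv track=rewrite | github.com/chdickey/AOC2024 | day_12.py | find_top_left
-- ===== SOURCE A (Python) =====
-- def find_top_left(group):
--     top = 9999
--     left = 9999
--     for position in group:
--         if position[0] < top:
--             top = position[0]
--     for position in group:
--         if position[0] == top and position[1] < left:
--             left = position[1]
--     return (top, left)
-- ===== SOURCE B (Python) =====
-- def find_top_left(group):
--     if not group:
--         return (9999, 9999)
--     p = min(group, key=lambda pos: (pos[0], pos[1]))
--     return (p[0], p[1])
-- ===== Notes on version B (the rewrite author's own statement) =====
-- stated objective: idiomatic
-- what changed: Replaces A's two sequential scans (min row, then min col among min-row positions, each against a 9999 sentinel) with a single keyed min() selection of the lexicographically smallest position, with the empty group handled up front.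
-- intended difference: On nonempty groups whose lexicographically smallest position has row > 9999 or column > 9999, A's leftover 9999 sentinel replaces that component (e.g. A returns (0, 9999) on [(0, 10000)]); B returns the actual top-left position (0, 10000), which is the intended value. — e.g. on find_top_left([(0, 10000)]): A returns (0, 9999), B returns (0, 10000)
import Mathlib
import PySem

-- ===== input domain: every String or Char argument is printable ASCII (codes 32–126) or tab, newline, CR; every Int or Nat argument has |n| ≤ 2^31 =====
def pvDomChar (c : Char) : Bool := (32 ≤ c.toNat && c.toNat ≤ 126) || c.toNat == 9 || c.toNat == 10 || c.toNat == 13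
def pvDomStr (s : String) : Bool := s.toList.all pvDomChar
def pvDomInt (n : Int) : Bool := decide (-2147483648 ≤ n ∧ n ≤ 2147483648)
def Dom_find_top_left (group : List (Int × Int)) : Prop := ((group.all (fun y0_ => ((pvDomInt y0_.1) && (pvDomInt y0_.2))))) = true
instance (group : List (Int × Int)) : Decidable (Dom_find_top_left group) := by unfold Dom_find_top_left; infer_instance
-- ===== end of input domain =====

-- B replaces A's two sequential sentinel scans with one keyed min() selection (idiomatic; same O(n) cost).

-- ===== PORT A =====
def find_top_left (group : List (Int × Int)) : Int × Int :=
  let top := group.foldl (fun top position => if position.1 < top then position.1 else top) 9999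
  let left := group.foldl (fun left position => if position.1 = top ∧ position.2 < left then position.2 else left) 9999
  (top, left)

-- ===== PORT B =====
-- min(group, key=lambda pos: (pos[0], pos[1])) → PySem.List.min2?; 'none' is exactly the empty-group guard of Source B
def find_top_left_alt (group : List (Int × Int)) : Int × Int :=
  match PySem.List.min2? group (fun pos => pos.1) (fun pos => pos.2) with
  | none => (9999, 9999)
  | some p => (p.1, p.2)

-- ===== PRECONDITION & SPEC =====
-- On nonempty groups whose lexicographically smallest position has row > 9999 or column > 9999, A's
-- leftover 9999 sentinel replaces that component; B returns the actual top-left position, the intended value.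
def D_find_top_left (group : List (Int × Int)) : Prop :=
  ∃ p ∈ group, (∀ q ∈ group, p.1 < q.1 ∨ (p.1 = q.1 ∧ p.2 ≤ q.2)) ∧ (9999 < p.1 ∨ 9999 < p.2)
instance (group : List (Int × Int)) : Decidable (D_find_top_left group) := by unfold D_find_top_left; infer_instance

def Spec_find_top_left (group : List (Int × Int)) (out : Int × Int) : Prop :=
  ¬ D_find_top_left group → out = find_top_left_alt group
instance (group : List (Int × Int)) (out : Int × Int) : Decidable (Spec_find_top_left group out) := by unfold Spec_find_top_left; infer_instance

def pvDiffWitness_find_top_left : (List (Int × Int)) := [(0, 10000)]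
def pvDiffWitnessOut_find_top_left : (Int × Int) × (Int × Int) := ((0, 9999), (0, 10000))

-- ===== CLAIM (what is proved, stated in full; the proofs are below) =====
def Claim_unchanged_find_top_left : Prop := ∀ (group : List (Int × Int)), Dom_find_top_left group → Spec_find_top_left group (find_top_left group)
def Claim_changed_find_top_left : Prop := Dom_find_top_left (pvDiffWitness_find_top_left) ∧ D_find_top_left (pvDiffWitness_find_top_left) ∧ find_top_left (pvDiffWitness_find_top_left) = pvDiffWitnessOut_find_top_left.1 ∧ find_top_left_alt (pvDiffWitness_find_top_left) = pvDiffWitnessOut_find_top_left.2 ∧ pvDiffWitnessOut_find_top_left.1 ≠ pvDiffWitnessOut_find_top_left.2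
def Claim_exact_find_top_left : Prop := ∀ (group : List (Int × Int)), Dom_find_top_left group → D_find_top_left group → find_top_left group ≠ find_top_left_alt group

-- ===== LEMMAS AND PROOFS =====

-- lexicographic "less or equal" on positions
def lle (a b : Int × Int) : Prop := a.1 < b.1 ∨ (a.1 = b.1 ∧ a.2 ≤ b.2)

-- the step function of min2? with the two projection keys
def m2step (acc : Option (Int × Int)) (x : Int × Int) : Option (Int × Int) :=
  match acc with
  | none => some x
  | some m => if (decide (x.1 < m.1) || !decide (m.1 < x.1) && decide (x.2 < m.2)) = true then some x else some m

lemma min2?_eq_foldl (group : List (Int × Int)) :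
    PySem.List.min2? group (fun pos => pos.1) (fun pos => pos.2) = group.foldl m2step none := by
  unfold PySem.List.min2?
  congr 1
  funext acc x
  cases acc <;> simp [m2step]

lemma m2_fold_some (group : List (Int × Int)) : ∀ (m0 : Int × Int), ∀ m,
    group.foldl m2step (some m0) = some m →
    (m = m0 ∨ m ∈ group) ∧ lle m m0 ∧ ∀ q ∈ group, lle m q := by
  induction group with
  | nil =>
    intro m0 m h
    simp [List.foldl] at h
    subst h
    exact ⟨Or.inl rfl, Or.inr ⟨rfl, le_refl _⟩, by simp⟩
  | cons x xs ih =>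
    intro m0 m h
    simp only [List.foldl] at h
    by_cases hc : (decide (x.1 < m0.1) || !decide (m0.1 < x.1) && decide (x.2 < m0.2)) = true
    · -- new accumulator is x, and x is lex-strictly below m0
      have hx : lle x m0 := by
        simp only [Bool.or_eq_true, Bool.and_eq_true, Bool.not_eq_true', decide_eq_true_eq,
          decide_eq_false_iff_not] at hc
        unfold lle; omega
      rw [show m2step (some m0) x = some x by simp [m2step, hc]] at h
      obtain ⟨hmem, hle, hall⟩ := ih x m h
      refine ⟨?_, ?_, ?_⟩
      · rcases hmem with h1 | h1
        · exact Or.inr (by simp [h1])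
        · exact Or.inr (by simp [h1])
      · unfold lle at *; omega
      · intro q hq
        rcases List.mem_cons.mp hq with h1 | h1
        · subst h1; exact hle
        · exact hall q h1
    · -- accumulator stays m0, and m0 is lex-below-or-equal x
      have hx : lle m0 x := by
        simp only [Bool.or_eq_true, Bool.and_eq_true, Bool.not_eq_true', decide_eq_true_eq,
          decide_eq_false_iff_not] at hc
        unfold lle; omega
      rw [show m2step (some m0) x = some m0 by simp [m2step, hc]] at h
      obtain ⟨hmem, hle, hall⟩ := ih m0 m h
      refine ⟨?_, hle, ?_⟩
      · rcases hmem with h1 | h1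
        · exact Or.inl h1
        · exact Or.inr (List.mem_cons_of_mem _ h1)
      · intro q hq
        rcases List.mem_cons.mp hq with h1 | h1
        · subst h1; unfold lle at *; omega
        · exact hall q h1

lemma m2_fold_isSome (group : List (Int × Int)) : ∀ (m0 : Int × Int),
    ∃ m, group.foldl m2step (some m0) = some m := by
  induction group with
  | nil => intro m0; exact ⟨m0, rfl⟩
  | cons x xs ih =>
    intro m0
    simp only [List.foldl, m2step]
    split_ifs <;> exact ih _

lemma min2?_some_spec (group : List (Int × Int)) (m : Int × Int)
    (h : PySem.List.min2? group (fun pos => pos.1) (fun pos => pos.2) = some m) :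
    m ∈ group ∧ ∀ q ∈ group, lle m q := by
  rw [min2?_eq_foldl] at h
  cases group with
  | nil => simp [List.foldl] at h
  | cons x xs =>
    simp only [List.foldl, m2step] at h
    obtain ⟨hmem, hle, hall⟩ := m2_fold_some xs x m h
    refine ⟨?_, ?_⟩
    · rcases hmem with h1 | h1
      · simp [h1]
      · exact List.mem_cons_of_mem _ h1
    · intro q hq
      rcases List.mem_cons.mp hq with h1 | h1
      · subst h1; exact hle
      · exact hall q h1

lemma min2?_cons_some (x : Int × Int) (xs : List (Int × Int)) :
    ∃ m, PySem.List.min2? (x :: xs) (fun pos => pos.1) (fun pos => pos.2) = some m := by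
  rw [min2?_eq_foldl]
  simp only [List.foldl, m2step]
  exact m2_fold_isSome xs x

-- A's first loop: running min of rows against the accumulator
lemma tf_spec (group : List (Int × Int)) : ∀ (t : Int),
    (group.foldl (fun top position => if position.1 < top then position.1 else top) t ≤ t ∧
     ∀ p ∈ group, group.foldl (fun top position => if position.1 < top then position.1 else top) t ≤ p.1) ∧
    (group.foldl (fun top position => if position.1 < top then position.1 else top) t = t ∨
     ∃ p ∈ group, group.foldl (fun top position => if position.1 < top then position.1 else top) t = p.1) := by
  induction group with
  | nil => intro t; simp
  | cons x xs ih =>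
    intro t
    simp only [List.foldl]
    by_cases hx : x.1 < t
    · rw [if_pos hx]
      obtain ⟨⟨hle, hall⟩, hmem⟩ := ih x.1
      refine ⟨⟨by omega, ?_⟩, ?_⟩
      · intro p hp
        rcases List.mem_cons.mp hp with h1 | h1
        · subst h1; exact hle
        · exact hall p h1
      · rcases hmem with h1 | h1
        · exact Or.inr ⟨x, List.mem_cons_self .., h1⟩
        · obtain ⟨p, hp, hp2⟩ := h1
          exact Or.inr ⟨p, List.mem_cons_of_mem _ hp, hp2⟩
    · rw [if_neg hx]
      obtain ⟨⟨hle, hall⟩, hmem⟩ := ih t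
      refine ⟨⟨hle, ?_⟩, ?_⟩
      · intro p hp
        rcases List.mem_cons.mp hp with h1 | h1
        · subst h1; omega
        · exact hall p h1
      · rcases hmem with h1 | h1
        · exact Or.inl h1
        · obtain ⟨p, hp, hp2⟩ := h1
          exact Or.inr ⟨p, List.mem_cons_of_mem _ hp, hp2⟩

-- A's second loop: running min of columns among positions with row = T
lemma lf_spec (group : List (Int × Int)) (T : Int) : ∀ (l : Int),
    (group.foldl (fun left position => if position.1 = T ∧ position.2 < left then position.2 else left) l ≤ l ∧
     ∀ p ∈ group, p.1 = T → group.foldl (fun left position => if position.1 = T ∧ position.2 < left then position.2 else left) l ≤ p.2) ∧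
    (group.foldl (fun left position => if position.1 = T ∧ position.2 < left then position.2 else left) l = l ∨
     ∃ p ∈ group, p.1 = T ∧ group.foldl (fun left position => if position.1 = T ∧ position.2 < left then position.2 else left) l = p.2) := by
  induction group with
  | nil => intro l; simp
  | cons x xs ih =>
    intro l
    simp only [List.foldl]
    by_cases hx : x.1 = T ∧ x.2 < l
    · rw [if_pos hx]
      obtain ⟨⟨hle, hall⟩, hmem⟩ := ih x.2
      refine ⟨⟨by omega, ?_⟩, ?_⟩
      · intro p hp hpT
        rcases List.mem_cons.mp hp with h1 | h1
        · subst h1; exact hle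
        · exact hall p h1 hpT
      · rcases hmem with h1 | h1
        · exact Or.inr ⟨x, List.mem_cons_self .., hx.1, h1⟩
        · obtain ⟨p, hp, hpT, hp2⟩ := h1
          exact Or.inr ⟨p, List.mem_cons_of_mem _ hp, hpT, hp2⟩
    · rw [if_neg hx]
      obtain ⟨⟨hle, hall⟩, hmem⟩ := ih l
      refine ⟨⟨hle, ?_⟩, ?_⟩
      · intro p hp hpT
        rcases List.mem_cons.mp hp with h1 | h1
        · subst h1
          have : ¬ p.2 < l := fun hlt => hx ⟨hpT, hlt⟩
          omega
        · exact hall p h1 hpT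
      · rcases hmem with h1 | h1
        · exact Or.inl h1
        · obtain ⟨p, hp, hpT, hp2⟩ := h1
          exact Or.inr ⟨p, List.mem_cons_of_mem _ hp, hpT, hp2⟩

-- A's value, expressed through the lexicographic minimum m of the group
lemma find_top_left_of_min (group : List (Int × Int)) (m : Int × Int)
    (hmem : m ∈ group) (hmin : ∀ q ∈ group, lle m q) :
    find_top_left group = if m.1 ≤ 9999 then (m.1, if m.2 ≤ 9999 then m.2 else 9999) else (9999, 9999) := by
  unfold find_top_left
  obtain ⟨⟨htle, htall⟩, htmem⟩ := tf_spec group 9999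
  set T := group.foldl (fun top position => if position.1 < top then position.1 else top) (9999 : Int) with hT
  obtain ⟨⟨hlle, hlall⟩, hlmem⟩ := lf_spec group T 9999
  set L := group.foldl (fun left position => if position.1 = T ∧ position.2 < left then position.2 else left) (9999 : Int) with hL
  have htm : T ≤ m.1 := htall m hmem
  -- every row is at least m.1
  have hrow : ∀ p ∈ group, m.1 ≤ p.1 := by
    intro p hp; have := hmin p hp; unfold lle at this; omega
  have hTval : T = if m.1 ≤ 9999 then m.1 else 9999 := by
    rcases htmem with h1 | h1
    · rw [h1]; rw [h1] at htm; split_ifs <;> omega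
    · obtain ⟨p, hp, hp2⟩ := h1
      have := hrow p hp
      split_ifs <;> omega
  by_cases hm1 : m.1 ≤ 9999
  · -- top = m.1; left = min 9999 m.2
    have hT' : T = m.1 := by rw [hTval]; simp [hm1]
    have hcol : ∀ p ∈ group, p.1 = T → m.2 ≤ p.2 := by
      intro p hp hpT
      have := hmin p hp; unfold lle at this; rw [hT'] at hpT; omega
    have hLm : L ≤ m.2 := hlall m hmem (by rw [hT'])
    have hLval : L = if m.2 ≤ 9999 then m.2 else 9999 := by
      rcases hlmem with h1 | h1
      · rw [h1]; rw [h1] at hLm; split_ifs <;> omega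
      · obtain ⟨p, hp, hpT, hp2⟩ := h1
        have := hcol p hp hpT
        split_ifs <;> omega
    simp only [hm1, if_true]
    exact Prod.ext (by simpa using hT') (by simpa using hLval)
  · -- all rows exceed 9999: both sentinels survive
    have hT' : T = 9999 := by rw [hTval]; simp [hm1]
    have hLval : L = 9999 := by
      rcases hlmem with h1 | h1
      · exact h1
      · obtain ⟨p, hp, hpT, hp2⟩ := h1
        have := hrow p hp
        rw [hT'] at hpT
        omega
    simp only [hm1, if_false]
    exact Prod.ext (by simpa using hT') (by simpa using hLval)

-- ===== VERDICT (by name: the statement is the Claim_ definition above) =====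
theorem find_top_left_spec : Claim_unchanged_find_top_left := by
  intro group _ hnd
  cases group with
  | nil => rfl
  | cons x xs =>
    obtain ⟨m, hm⟩ := min2?_cons_some x xs
    obtain ⟨hmem, hmin⟩ := min2?_some_spec _ m hm
    have hnb : ¬ (9999 < m.1 ∨ 9999 < m.2) := by
      intro hb
      exact hnd ⟨m, hmem, fun q hq => hmin q hq, hb⟩
    rw [find_top_left_of_min _ m hmem hmin]
    unfold find_top_left_alt
    rw [hm]
    have h1 : m.1 ≤ 9999 := by omega
    have h2 : m.2 ≤ 9999 := by omega
    simp [h1, h2]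

theorem find_top_left_changed : Claim_changed_find_top_left := by
  unfold Claim_changed_find_top_left; decide

theorem find_top_left_tight : Claim_exact_find_top_left := by
  intro group _ hD
  obtain ⟨p, hp, hpmin, hpbad⟩ := hD
  cases group with
  | nil => simp at hp
  | cons x xs =>
    obtain ⟨m, hm⟩ := min2?_cons_some x xs
    obtain ⟨hmem, hmin⟩ := min2?_some_spec _ m hm
    -- p and m are both lexicographic minima, so they have the same coordinates
    have h1 : lle m p := hmin p hp
    have h2 : lle p m := hpmin m hmem
    unfold lle at h1 h2
    have hm1 : m.1 = p.1 := by omega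
    have hm2 : m.2 = p.2 := by omega
    rw [find_top_left_of_min _ m hmem hmin]
    unfold find_top_left_alt
    rw [hm]
    intro hEq
    rw [hm1, hm2] at hEq
    split_ifs at hEq with ha hb
    · rcases hpbad with h | h <;> omega
    · have := congrArg Prod.snd hEq; simp at this; omega
    · have := congrArg Prod.fst hEq; simp at this; omega
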